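-- pv_equiv track=rewrite | github.com/RemiTsai46/Railway-Signboard-Generator | resources/functions/calculations.py | rowLen
-- ===== SOURCE A (Python) =====
-- def rowLen(width:int,boxWidths,lineRange:tuple[int,int],boxGap:int): # p=platformline
--     #var init
--     total = 0
--     addRow = False
--     col = lineRange[1]-lineRange[0]
--
--     total = sum(boxWidths[lineRange[0]:lineRange[1]]) + boxGap*(col-1)
--
--     while boxGap > 0:
--         if total > width-6:
--             boxGap -= 1
--             total -= (col-1)
--             if boxGap < 1:
--                 addRow = True
--                 boxGap = 1
--                 break
--         else:
--             break
--
--     if total % 2 == 1: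
--         total += 1
--
--     return total,boxGap,addRow
-- ===== SOURCE B (Python) =====
-- def rowLen(width: int, boxWidths, lineRange: tuple[int, int], boxGap: int):
--     lo, hi = lineRange
--     col = hi - lo
--     step = col - 1
--     total = sum(boxWidths[lo:hi]) + boxGap * step
--     addRow = False
--     if boxGap > 0 and total > width - 6:
--         excess = total - (width - 6)
--         # number of gap decrements needed; if step <= 0 the loop can never fit
--         k = -(-excess // step) if step > 0 else boxGap
--         if k >= boxGap:
--             total -= boxGap * step
--             boxGap = 1
--             addRow = True
--         else:
--             total -= k * step
--             boxGap -= k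
--     if total % 2 == 1:
--         total += 1
--     return total, boxGap, addRow
-- ===== Notes on version B (the rewrite author's own statement) =====
-- stated objective: alternative
-- what changed: Replaces A's decrement-by-one while loop over boxGap with a closed form: the number of needed gap decrements is one ceiling division (k = ceil(excess/(col-1)) when col-1 > 0, else all of boxGap), then total/boxGap/addRow are set directly; overall cost is dominated by the slice sum in both, so no measurable speedup.
import Mathlib
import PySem

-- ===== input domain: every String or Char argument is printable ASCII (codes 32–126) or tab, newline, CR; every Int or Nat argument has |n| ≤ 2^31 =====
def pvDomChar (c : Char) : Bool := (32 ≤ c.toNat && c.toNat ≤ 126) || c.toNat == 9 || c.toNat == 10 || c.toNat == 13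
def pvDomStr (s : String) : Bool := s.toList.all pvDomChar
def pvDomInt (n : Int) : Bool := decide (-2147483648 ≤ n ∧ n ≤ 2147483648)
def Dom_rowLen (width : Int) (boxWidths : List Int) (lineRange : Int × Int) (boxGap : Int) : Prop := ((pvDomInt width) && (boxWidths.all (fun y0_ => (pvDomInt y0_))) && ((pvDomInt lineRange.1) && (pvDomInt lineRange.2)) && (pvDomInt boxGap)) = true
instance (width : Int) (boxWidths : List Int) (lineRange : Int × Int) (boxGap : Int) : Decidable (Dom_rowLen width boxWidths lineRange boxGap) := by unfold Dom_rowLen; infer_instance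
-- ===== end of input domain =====

-- B replaces A's decrement-by-one while loop with a closed form: the number of gap
-- decrements is computed by one ceiling division (alternative algorithm, same proved value).

-- ===== PORT A =====
-- A's while loop; it decreases boxGap by exactly 1 per iteration, so fuel = boxGap.toNat
-- is always sufficient (when fuel runs out, boxGap ≤ 0 and the guard is false anyway).
def rowLenLoopA (width col : Int) : Nat → Int → Int → Int × Int × Bool
  | 0, total, boxGap => (total, boxGap, false)
  | n + 1, total, boxGap =>
    if boxGap > 0 then
      if total > width - 6 then
        let boxGap' := boxGap - 1
        let total' := total - (col - 1)
        if boxGap' < 1 then (total', 1, true)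
        else rowLenLoopA width col n total' boxGap'
      else (total, boxGap, false)
    else (total, boxGap, false)

def rowLen (width : Int) (boxWidths : List Int) (lineRange : Int × Int) (boxGap : Int) : Int × Int × Bool :=
  let col := lineRange.2 - lineRange.1
  let total := (PySem.List.slice boxWidths (some lineRange.1) (some lineRange.2)).sum + boxGap * (col - 1)
  let r := rowLenLoopA width col boxGap.toNat total boxGap
  let total := r.1
  let boxGap := r.2.1
  let addRow := r.2.2
  let total := if PySem.Int.mod total 2 = 1 then total + 1 else total
  (total, boxGap, addRow)

-- ===== PORT B =====
def rowLen_alt (width : Int) (boxWidths : List Int) (lineRange : Int × Int) (boxGap : Int) : Int × Int × Bool :=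
  let col := lineRange.2 - lineRange.1
  let step := col - 1
  let total := (PySem.List.slice boxWidths (some lineRange.1) (some lineRange.2)).sum + boxGap * step
  let r :=
    if boxGap > 0 ∧ total > width - 6 then
      let excess := total - (width - 6)
      let k := if step > 0 then -(PySem.Int.floordiv (-excess) step) else boxGap
      if k ≥ boxGap then (total - boxGap * step, 1, true)
      else (total - k * step, boxGap - k, false)
    else (total, boxGap, false)
  let total := r.1
  let total := if PySem.Int.mod total 2 = 1 then total + 1 else total
  (total, r.2.1, r.2.2)

-- ===== PRECONDITION & SPEC =====
def Spec_rowLen (width : Int) (boxWidths : List Int) (lineRange : Int × Int) (boxGap : Int) (out : Int × Int × Bool) : Prop := out = rowLen_alt width boxWidths lineRange boxGap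
instance (width : Int) (boxWidths : List Int) (lineRange : Int × Int) (boxGap : Int) (out : Int × Int × Bool) : Decidable (Spec_rowLen width boxWidths lineRange boxGap out) := by unfold Spec_rowLen; infer_instance

-- ===== CLAIM (what is proved, stated in full; the proofs are below) =====
def Claim_equal_rowLen : Prop := ∀ (width : Int) (boxWidths : List Int) (lineRange : Int × Int) (boxGap : Int), Dom_rowLen width boxWidths lineRange boxGap → Spec_rowLen width boxWidths lineRange boxGap (rowLen width boxWidths lineRange boxGap)

-- ===== LEMMAS AND PROOFS =====

-- B's branch on a given (total, boxGap) state, as a function (the loop's closed form).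
def loopClosed (width step : Int) (total boxGap : Int) : Int × Int × Bool :=
  if boxGap > 0 ∧ total > width - 6 then
    let excess := total - (width - 6)
    let k := if step > 0 then -(PySem.Int.floordiv (-excess) step) else boxGap
    if k ≥ boxGap then (total - boxGap * step, 1, true)
    else (total - k * step, boxGap - k, false)
  else (total, boxGap, false)

-- ceiling-division facts via PySem.Int.neg_floordiv_neg_eq_iff_of_pos
theorem ceil_ge_one {e s : Int} (hs : 0 < s) (he : 0 < e) :
    1 ≤ -(PySem.Int.floordiv (-e) s) := by
  have h := (PySem.Int.neg_floordiv_neg_eq_iff_of_pos hs).mp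
      (rfl : -(PySem.Int.floordiv (-e) s) = -(PySem.Int.floordiv (-e) s))
  set K := -(PySem.Int.floordiv (-e) s) with hK
  nlinarith [h.1, h.2]

theorem ceil_eq_one {e s : Int} (hs : 0 < s) (he : 0 < e) (hle : e ≤ s) :
    -(PySem.Int.floordiv (-e) s) = 1 := by
  exact (PySem.Int.neg_floordiv_neg_eq_iff_of_pos hs).mpr (by constructor <;> nlinarith)

theorem ceil_step {e s : Int} (hs : 0 < s) :
    -(PySem.Int.floordiv (-(e - s)) s) = -(PySem.Int.floordiv (-e) s) - 1 := by
  have h := (PySem.Int.neg_floordiv_neg_eq_iff_of_pos hs).mp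
      (rfl : -(PySem.Int.floordiv (-e) s) = -(PySem.Int.floordiv (-e) s))
  set K := -(PySem.Int.floordiv (-e) s) with hK
  exact (PySem.Int.neg_floordiv_neg_eq_iff_of_pos hs).mpr (by constructor <;> nlinarith [h.1, h.2])

-- The loop equals the closed form whenever the fuel covers boxGap.
theorem loopA_eq_closed (width step : Int) :
    ∀ (n : Nat) (total boxGap : Int), boxGap ≤ (n : Int) →
      rowLenLoopA width (step + 1) n total boxGap = loopClosed width step total boxGap := by
  intro n
  induction n with
  | zero =>
    intro total boxGap hle
    simp only [rowLenLoopA, loopClosed]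
    rw [if_neg (by omega : ¬ (boxGap > 0 ∧ total > width - 6))]
  | succ n ih =>
    intro total boxGap hle
    simp only [rowLenLoopA]
    by_cases hg : boxGap > 0
    · rw [if_pos hg]
      by_cases ht : total > width - 6
      · rw [if_pos ht]
        have hcl : loopClosed width step total boxGap =
            (let k := if step > 0 then -(PySem.Int.floordiv (-(total - (width - 6))) step) else boxGap
             if k ≥ boxGap then (total - boxGap * step, 1, true)
             else (total - k * step, boxGap - k, false)) := by
          simp only [loopClosed]; rw [if_pos ⟨hg, ht⟩]
        have hsimp : step + 1 - 1 = step := by ring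
        rw [hsimp]
        by_cases hb1 : boxGap - 1 < 1
        · -- boxGap = 1: loop exits setting addRow
          rw [if_pos hb1]
          have hbg : boxGap = 1 := by omega
          subst hbg
          rw [hcl]
          simp only
          by_cases hsp : step > 0
          · rw [if_pos hsp]
            have h1 := ceil_ge_one hsp (by omega : (0:Int) < total - (width - 6))
            rw [if_pos (by omega : -(PySem.Int.floordiv (-(total - (width - 6))) step) ≥ 1)]
            congr 1; ring
          · rw [if_neg hsp, if_pos (le_refl 1)]
            congr 1; ring
        · rw [if_neg hb1]
          rw [ih (total - step) (boxGap - 1) (by omega)]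
          rw [hcl]
          simp only [loopClosed]
          by_cases ht2 : total - step > width - 6
          · rw [if_pos ⟨by omega, ht2⟩]
            by_cases hsp : step > 0
            · rw [if_pos hsp, if_pos hsp]
              have harg : total - step - (width - 6) = (total - (width - 6)) - step := by ring
              rw [harg, ceil_step hsp]
              set K := -(PySem.Int.floordiv (-(total - (width - 6))) step) with hK
              by_cases hk : K - 1 ≥ boxGap - 1
              · rw [if_pos hk, if_pos (by omega : K ≥ boxGap)]
                congr 1; ring
              · rw [if_neg hk, if_neg (by omega : ¬ K ≥ boxGap)]
                simp only [Prod.mk.injEq]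
                exact ⟨by ring, by omega, trivial⟩
            · rw [if_neg hsp, if_neg hsp]
              rw [if_pos (le_refl (boxGap - 1)), if_pos (le_refl boxGap)]
              congr 1; ring
          · rw [if_neg (by intro h; exact ht2 h.2)]
            by_cases hsp : step > 0
            · rw [if_pos hsp]
              rw [ceil_eq_one hsp (by omega) (by omega)]
              rw [if_neg (by omega : ¬ (1 : Int) ≥ boxGap)]
              simp only [Prod.mk.injEq]
              exact ⟨by ring, trivial⟩
            · exfalso; omega
      · rw [if_neg ht]
        simp only [loopClosed]
        rw [if_neg (by intro h; exact ht h.2)]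
    · rw [if_neg hg]
      simp only [loopClosed]
      rw [if_neg (by intro h; exact hg h.1)]

theorem rowLen_eq_alt (width : Int) (boxWidths : List Int) (lineRange : Int × Int) (boxGap : Int) :
    rowLen width boxWidths lineRange boxGap = rowLen_alt width boxWidths lineRange boxGap := by
  unfold rowLen rowLen_alt
  simp only
  set step := lineRange.2 - lineRange.1 - 1 with hstep
  have hcol : lineRange.2 - lineRange.1 = step + 1 := by omega
  rw [hcol]
  have hloop := loopA_eq_closed width step boxGap.toNat
      ((PySem.List.slice boxWidths (some lineRange.1) (some lineRange.2)).sum + boxGap * step)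
      boxGap (Int.self_le_toNat boxGap)
  rw [hloop, loopClosed]

-- ===== VERDICT (by name: the statement is the Claim_ definition above) =====
theorem rowLen_spec : Claim_equal_rowLen := by
  intro width boxWidths lineRange boxGap _
  exact rowLen_eq_alt width boxWidths lineRange boxGap
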